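-- pv_equiv track=rewrite | github.com/nphoang1102/6.001 | project5/ps5.py | is_phrase_valid
-- ===== SOURCE A (Python) =====
-- import string
--
-- def is_phrase_valid(input):
--
--     # Some storage variables
--     cleaned = ''
--     last_char = ''
--
--     # Convert the input to all lower case first,
--     # then check for excessive space and punctuations
--     lower = input.lower()
--     for char in lower:
--         cond = char == ' ' and last_char == ' '
--         if (char in string.punctuation) or (cond):
--             return False
--         last_char = char
--
--     # Terminate and return true if we have not yet terminated
--     return True
-- ===== SOURCE B (Python) =====
-- import string
--
-- def is_phrase_valid(input):
--     lower = input.lower()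
--     if '  ' in lower:
--         return False
--     if any(c in string.punctuation for c in lower):
--         return False
--     return True
-- ===== Notes on version B (the rewrite author's own statement) =====
-- stated objective: idiomatic
-- what changed: Replaced the single stateful loop with last_char bookkeeping and early return by two independent declarative checks: a substring search for a double space and an any() scan for punctuation over the lowercased input.
import Mathlib
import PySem

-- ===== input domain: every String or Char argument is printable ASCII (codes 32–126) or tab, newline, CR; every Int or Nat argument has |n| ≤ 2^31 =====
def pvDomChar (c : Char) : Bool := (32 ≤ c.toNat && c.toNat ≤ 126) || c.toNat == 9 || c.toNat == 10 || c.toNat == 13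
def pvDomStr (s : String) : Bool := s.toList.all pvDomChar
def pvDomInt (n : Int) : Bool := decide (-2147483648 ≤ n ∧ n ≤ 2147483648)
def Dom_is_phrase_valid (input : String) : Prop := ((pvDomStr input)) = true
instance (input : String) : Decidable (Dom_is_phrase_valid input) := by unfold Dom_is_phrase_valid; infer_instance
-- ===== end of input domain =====

-- B replaces A's single stateful loop (last_char bookkeeping, early return) by two independent
-- declarative checks: a substring search for '  ' and an `any` scan for punctuation (idiomatic; same cost).

-- ===== PORT A =====
-- string.punctuation, shared by both ports ('char in string.punctuation')
def pvPunctuation : List Char := "!\"#$%&'()*+,-./:;<=>?@[\\]^_`{|}~".toList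

-- the for-loop of A; last_char is '' initially (none) and then the previous char (some c)
def pvLoopA : List Char → Option Char → Bool
  | [], _ => true
  | c :: rest, last =>
      let cond := (c == ' ') && (last == some ' ')
      if pvPunctuation.contains c || cond then false
      else pvLoopA rest (some c)

def is_phrase_valid (input : String) : Bool :=
  pvLoopA (PySem.Str.lower input).toList none

-- ===== PORT B =====
def is_phrase_valid_alt (input : String) : Bool :=
  let lower := PySem.Str.lower input
  if PySem.Str.isIn "  " lower then false
  else if lower.toList.any (fun c => pvPunctuation.contains c) then false
  else true

-- ===== PRECONDITION & SPEC =====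
def Spec_is_phrase_valid (input : String) (out : Bool) : Prop := out = is_phrase_valid_alt input
instance (input : String) (out : Bool) : Decidable (Spec_is_phrase_valid input out) := by unfold Spec_is_phrase_valid; infer_instance

-- ===== CLAIM (what is proved, stated in full; the proofs are below) =====
def Claim_equal_is_phrase_valid : Prop := ∀ (input : String), Dom_is_phrase_valid input → Spec_is_phrase_valid input (is_phrase_valid input)

-- ===== LEMMAS AND PROOFS =====

-- "double space seen" scan with a boolean 'previous char was a space' state
def pvDbl : Bool → List Char → Bool
  | _, [] => false
  | prev, c :: rest => (prev && c == ' ') || pvDbl (c == ' ') rest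

lemma pvDbl_iff (l : List Char) : ∀ (prev : Bool),
    pvDbl prev l = true ↔ (prev = true ∧ l.head? = some ' ') ∨ [' ', ' '] <:+: l := by
  induction l with
  | nil => simp [pvDbl]
  | cons c rest ih =>
      intro prev
      simp only [pvDbl, Bool.or_eq_true, Bool.and_eq_true, beq_iff_eq, ih,
        List.infix_cons_iff, List.head?_cons]
      constructor
      · rintro (⟨hp, hc⟩ | ⟨hc, hh⟩ | hinf)
        · exact Or.inl ⟨hp, by simp [hc]⟩
        · subst hc
          cases rest with
          | nil => simp at hh
          | cons d t =>
              simp only [List.head?_cons, Option.some.injEq] at hh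
              exact Or.inr (Or.inl (by simp [hh]))
        · exact Or.inr (Or.inr hinf)
      · rintro (⟨hp, hc⟩ | hpre | hinf)
        · simp only [Option.some.injEq] at hc
          exact Or.inl ⟨hp, hc⟩
        · rcases List.cons_prefix_cons.mp hpre with ⟨hc, htl⟩
          subst hc
          cases rest with
          | nil => simp at htl
          | cons d t =>
              rcases List.cons_prefix_cons.mp htl with ⟨hd, _⟩
              exact Or.inr (Or.inl ⟨rfl, by rw [List.head?_cons, ← hd]⟩)
        · exact Or.inr (Or.inr hinf)

-- A's loop equals "no punctuation and no double space" on the remaining characters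
lemma pvLoopA_eq (l : List Char) : ∀ (last : Option Char),
    pvLoopA l last =
      (!(l.any (fun c => pvPunctuation.contains c)) && !(pvDbl (last == some ' ') l)) := by
  induction l with
  | nil => intro last; simp [pvLoopA, pvDbl]
  | cons c rest ih =>
      intro last
      by_cases hp : c ∈ pvPunctuation
      · simp [pvLoopA, pvDbl, hp]
      · by_cases hc : c = ' '
        · subst hc
          by_cases hl : last = some ' '
          · simp [pvLoopA, pvDbl, hp, hl]
          · have hl' : (last == some ' ') = false := by simp [hl]
            simp [pvLoopA, pvDbl, hp, hl', ih, Bool.and_assoc]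
        · have hc' : (c == ' ') = false := by simp [hc]
          simp [pvLoopA, pvDbl, hp, hc', ih, Bool.and_assoc]

lemma pvDbl_false_iff_isIn (l : List Char) :
    pvDbl false l = PySem.Chars.isIn [' ', ' '] l := by
  by_cases h : [' ', ' '] <:+: l
  · rw [(pvDbl_iff l false).mpr (Or.inr h), (PySem.Chars.isIn_iff_infix _ _).mpr h]
  · have h1 : pvDbl false l = false := by
      rw [Bool.eq_false_iff]
      intro hh
      rcases (pvDbl_iff l false).mp hh with ⟨hf, _⟩ | hinf
      · simp at hf
      · exact h hinf
    rw [h1, Eq.comm, PySem.Chars.isIn_eq_false_iff]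
    exact h

-- ===== VERDICT (by name: the statement is the Claim_ definition above) =====
theorem is_phrase_valid_spec : Claim_equal_is_phrase_valid := by
  intro input _
  unfold Spec_is_phrase_valid is_phrase_valid is_phrase_valid_alt
  rw [pvLoopA_eq]
  have h2 : ("  " : String).toList = [' ', ' '] := by decide
  have h0 : ((none : Option Char) == some ' ') = false := rfl
  rw [h0]
  simp only [PySem.Str.isIn_eq, PySem.Str.toList_lower, h2, ← pvDbl_false_iff_isIn]
  cases hd : pvDbl false (PySem.Chars.lower input.toList) <;>
    cases hq : (PySem.Chars.lower input.toList).any (fun c => pvPunctuation.contains c) <;>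
      simp [hd, hq]
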